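-- pv_equiv track=rewrite | github.com/Jovan-04/icpc-training | 06-17/evan/ujan.py | is_jolly
-- ===== SOURCE A (Python) =====
-- from itertools import pairwise
--
-- def is_jolly(sequence: list[int]) -> bool:
--     n = len(sequence)
--     differences = set()
--
--     for a, b in pairwise(sequence):
--         diff = abs(a - b)
--         if (diff > n - 1 or diff == 0 or diff in differences):
--             return False
--
--         differences.add(diff)
--
--     return True
-- ===== SOURCE B (Python) =====
-- def is_jolly(sequence: list[int]) -> bool:
--     diffs = sorted(abs(a - b) for a, b in zip(sequence, sequence[1:]))
--     return diffs == list(range(1, len(sequence)))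
-- ===== Notes on version B (the rewrite author's own statement) =====
-- stated objective: alternative
-- what changed: Replaces A's stateful set-membership loop with early returns by sorting the adjacent absolute differences and comparing the sorted list for list equality against [1..n-1]; no set and no per-pair guards.
import Mathlib
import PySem

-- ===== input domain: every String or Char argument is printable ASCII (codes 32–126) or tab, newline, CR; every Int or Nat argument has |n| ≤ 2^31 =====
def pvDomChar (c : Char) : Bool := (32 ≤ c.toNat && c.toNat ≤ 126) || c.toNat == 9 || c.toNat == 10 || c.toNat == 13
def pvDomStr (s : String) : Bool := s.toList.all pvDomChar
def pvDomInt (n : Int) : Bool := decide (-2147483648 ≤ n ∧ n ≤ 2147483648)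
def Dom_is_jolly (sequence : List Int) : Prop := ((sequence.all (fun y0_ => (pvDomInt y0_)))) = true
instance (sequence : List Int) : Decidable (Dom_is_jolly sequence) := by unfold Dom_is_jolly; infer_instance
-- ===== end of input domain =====

-- B replaces A's stateful set-membership loop with early returns by sorting the adjacent
-- absolute differences and comparing the sorted list against [1..n-1]; objective: alternative.

-- ===== PORT A =====
-- the 'for a, b in pairwise(sequence)' loop with early 'return False'
def isJollyLoopA (n : Int) (pairs : List (Int × Int)) (differences : PySem.Set Int) : Bool :=
  match pairs with
  | [] => true
  | (a, b) :: rest =>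
    let diff := |a - b|
    if diff > n - 1 ∨ diff = 0 ∨ PySem.Set.contains differences diff then false
    else isJollyLoopA n rest (PySem.Set.add differences diff)

def is_jolly (sequence : List Int) : Bool :=
  isJollyLoopA (sequence.length : Int) (sequence.zip sequence.tail) PySem.Set.empty

-- ===== PORT B =====
-- sorted(abs(a-b) for a,b in zip(sequence, sequence[1:])) == list(range(1, len(sequence)))
-- (sequence[1:] is the tail)
def is_jolly_alt (sequence : List Int) : Bool :=
  decide (PySem.List.sorted ((sequence.zip sequence.tail).map (fun p => |p.1 - p.2|))
            (fun x => x) false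
          = PySem.List.pyRange 1 (sequence.length : Int) 1)

-- ===== PRECONDITION & SPEC =====
def Spec_is_jolly (sequence : List Int) (out : Bool) : Prop := out = is_jolly_alt sequence
instance (sequence : List Int) (out : Bool) : Decidable (Spec_is_jolly sequence out) := by unfold Spec_is_jolly; infer_instance

-- ===== CLAIM =====
def Claim_equal_is_jolly : Prop := ∀ (sequence : List Int), Dom_is_jolly sequence → Spec_is_jolly sequence (is_jolly sequence)

-- ===== LEMMAS AND PROOFS =====

-- A's loop succeeds iff the differences are pairwise distinct, each lies in [1, n-1],
-- and none is already in the accumulator.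
theorem isJollyLoopA_iff (n : Int) (pairs : List (Int × Int)) (acc : PySem.Set Int) :
    isJollyLoopA n pairs acc = true ↔
      ((pairs.map (fun p => |p.1 - p.2|)).Nodup ∧
       (∀ d ∈ pairs.map (fun p => |p.1 - p.2|), 1 ≤ d ∧ d ≤ n - 1) ∧
       (∀ d ∈ pairs.map (fun p => |p.1 - p.2|), d ∉ acc)) := by
  induction pairs generalizing acc with
  | nil => simp [isJollyLoopA]
  | cons hd tl ih =>
    obtain ⟨a, b⟩ := hd
    simp only [isJollyLoopA, List.map_cons, List.nodup_cons, List.mem_cons]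
    by_cases hbad : |a - b| > n - 1 ∨ |a - b| = 0 ∨ PySem.Set.contains acc (|a - b|) = true
    · rw [if_pos hbad]
      constructor
      · intro h; exact absurd h (by simp)
      · rintro ⟨⟨hnd, _⟩, hbnd, hacc⟩
        have hb1 := hbnd (|a - b|) (Or.inl rfl)
        rcases hbad with h1 | h2 | h3
        · omega
        · omega
        · exact absurd ((PySem.Set.contains_iff acc (|a - b|)).mp h3)
            (hacc (|a - b|) (Or.inl rfl))
    · rw [if_neg hbad]
      push Not at hbad
      obtain ⟨h1, h2, h3⟩ := hbad
      rw [ih]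
      constructor
      · rintro ⟨hnd, hbnd, hacc⟩
        refine ⟨⟨?_, hnd⟩, ?_, ?_⟩
        · intro hmem
          exact (hacc _ hmem) ((PySem.Set.mem_add acc _ _).mpr (Or.inr rfl))
        · rintro d (rfl | hd)
          · have := abs_nonneg (a - b)
            constructor <;> omega
          · exact hbnd _ hd
        · rintro d (rfl | hd) hdacc
          · exact h3 ((PySem.Set.contains_iff acc _).mpr hdacc)
          · exact (hacc _ hd) ((PySem.Set.mem_add acc _ _).mpr (Or.inl hdacc))
      · rintro ⟨⟨hne, hnd⟩, hbnd, hacc⟩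
        refine ⟨hnd, fun d hd => hbnd _ (Or.inr hd), fun d hd hdm => ?_⟩
        rcases (PySem.Set.mem_add acc _ d).mp hdm with h | rfl
        · exact hacc _ (Or.inr hd) h
        · exact hne hd

-- the length of the list of adjacent differences
theorem diffs_length (s : List Int) :
    ((s.zip s.tail).map (fun p => |p.1 - p.2|)).length = s.length - 1 := by
  cases s with
  | nil => simp
  | cons x xs => simp [List.length_zip]

theorem is_jolly_eq_alt (s : List Int) : is_jolly s = is_jolly_alt s := by
  set ds := (s.zip s.tail).map (fun p => |p.1 - p.2|) with hds
  have hlen : ds.length = s.length - 1 := diffs_length s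
  rw [Bool.eq_iff_iff]
  rw [is_jolly, isJollyLoopA_iff, is_jolly_alt, decide_eq_true_iff, ← hds]
  have hicc : (Finset.Icc (1 : Int) ((s.length : Int) - 1)).card = s.length - 1 := by
    rw [Int.card_Icc]; omega
  constructor
  · rintro ⟨hnd, hbnd, _⟩
    -- counting: ds is nodup, ⊆ Icc 1 (n-1), of length n-1, hence a permutation of 1..n-1
    have hsub : ds.toFinset ⊆ Finset.Icc 1 ((s.length : Int) - 1) := by
      intro y hy
      rw [List.mem_toFinset] at hy
      rw [Finset.mem_Icc]
      exact hbnd y hy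
    have hcard : ds.toFinset.card = ds.length := List.toFinset_card_of_nodup hnd
    have heq : ds.toFinset = Finset.Icc 1 ((s.length : Int) - 1) :=
      Finset.eq_of_subset_of_card_le hsub (by omega)
    have hperm : (PySem.List.pyRange 1 (s.length : Int) 1).Perm ds := by
      rw [List.perm_ext_iff_of_nodup (PySem.List.nodup_pyRange_one 1 _) hnd]
      intro x
      rw [PySem.List.mem_pyRange_one, ← List.mem_toFinset, heq, Finset.mem_Icc]
      omega
    exact PySem.List.sorted_id_eq_of_perm_of_pairwise _ _ hperm
      ((PySem.List.pairwise_lt_pyRange_one 1 _).imp le_of_lt)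
  · intro hsorted
    have hperm : ds.Perm (PySem.List.pyRange 1 (s.length : Int) 1) :=
      hsorted ▸ (PySem.List.sorted_perm ds (fun x => x) false).symm
    have hmem : ∀ d ∈ ds, 1 ≤ d ∧ d < (s.length : Int) := by
      intro d hd
      exact (PySem.List.mem_pyRange_one).mp (hperm.mem_iff.mp hd)
    refine ⟨hperm.nodup_iff.mpr (PySem.List.nodup_pyRange_one 1 _),
      fun d hd => by have := hmem d hd; omega,
      fun d _ h => by simp [PySem.Set.empty] at h⟩

-- ===== VERDICT =====
theorem is_jolly_spec : Claim_equal_is_jolly := by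
  intro s _
  unfold Spec_is_jolly
  exact is_jolly_eq_alt s
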